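-- pv_equiv track=rewrite | github.com/kimkisol/TIL | Algorithm/SWEA/1215_회문1/s1.py | cnt_palindrome
-- ===== SOURCE A (Python) =====
-- def cnt_palindrome(chars, M):
--     cnt = 0
--     # 행 별로 확인
--     for i in range(8):
--         for j in range(8 - M + 1):
--             for m in range(M // 2): #앞뒤로 하나씩 일치여부 확인
--                 if chars[i][j + m] != chars[i][j + M - 1 - m]:
--                     break
--             else:
--                 cnt += 1
--     # 열 별로 확인
--     for i in range(8):
--         for j in range(8 - M + 1):
--             for m in range(M // 2): #앞뒤로 하나씩 일치여부 확인
--                 if chars[j + m][i] != chars[j + M - 1 - m][i]: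
--                     break
--             else:
--                 cnt += 1
--     return cnt
-- ===== SOURCE B (Python) =====
-- def cnt_palindrome(chars, M):
--     # expand-around-center: count centers whose palindromic radius reaches M//2,
--     # instead of enumerating windows and comparing mirrored pairs
--     w = 8 - M + 1
--     if M < 2:
--         return 16 * max(0, w)   # every window of length < 2 is a palindrome
--     if w <= 0:
--         return 0                # no window of length M fits in a line of 8
--     need = M // 2
--     total = 0
--     for line in _lines(chars):
--         total += _count_line(line, M, need)
--     return total
--
-- def _lines(chars):
--     for i in range(8):
--         yield chars[i]
--     for i in range(8):
--         yield [chars[k][i] for k in range(8)]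
--
-- def _count_line(s, M, need):
--     cnt = 0
--     if M % 2 == 0:
--         for c in range(7):          # even length: center between c and c+1
--             r = 0
--             while c - r >= 0 and c + 1 + r < 8 and s[c - r] == s[c + 1 + r]:
--                 r += 1
--             if r >= need:
--                 cnt += 1
--     else:
--         for c in range(8):          # odd length: center at c
--             r = 0
--             while c - r - 1 >= 0 and c + r + 1 < 8 and s[c - r - 1] == s[c + r + 1]:
--                 r += 1
--             if r >= need:
--                 cnt += 1
--     return cnt
-- ===== Notes on version B (the rewrite author's own statement) =====
-- stated objective: alternative
-- what changed: Replaces A's window enumeration with mirrored-pair comparison by an expand-around-center algorithm: for each of the 7 (even M) or 8 (odd M) centers of a line it grows the palindromic radius outward once and counts centers whose radius reaches M//2, with closed forms for M<2 (all windows) and M>8 (no windows).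
import Mathlib
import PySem

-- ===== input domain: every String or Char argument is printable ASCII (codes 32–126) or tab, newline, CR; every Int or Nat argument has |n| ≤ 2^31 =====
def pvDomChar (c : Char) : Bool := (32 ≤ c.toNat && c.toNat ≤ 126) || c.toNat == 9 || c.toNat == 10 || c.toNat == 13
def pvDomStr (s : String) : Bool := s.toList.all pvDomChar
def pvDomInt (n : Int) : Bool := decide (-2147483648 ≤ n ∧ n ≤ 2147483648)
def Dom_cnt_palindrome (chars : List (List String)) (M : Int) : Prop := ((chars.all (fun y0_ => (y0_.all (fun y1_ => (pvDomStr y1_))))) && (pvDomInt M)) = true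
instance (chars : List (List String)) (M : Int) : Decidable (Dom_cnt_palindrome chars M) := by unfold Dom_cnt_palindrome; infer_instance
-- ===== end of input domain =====

-- B replaces A's enumerate-every-window-and-compare-mirrored-pairs scan by an
-- expand-around-center algorithm: per line it grows the palindromic radius at each
-- of the 7 (even M) / 8 (odd M) centers once and counts centers whose radius
-- reaches M//2; M < 2 (all windows) and M > 8 (no windows) are closed forms.

-- total cell access (out-of-range defaults are never reached under Pre_)
def pvRow (chars : List (List String)) (i : Int) : List String :=
  PySem.List.pyGetD chars i []
def pvCell (r : List String) (k : Int) : String :=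
  PySem.List.pyGetD r k ""

-- ===== PORT A =====
-- A's inner `for m … : if ≠: break / else: cnt += 1`: true iff no break fired
def pvAllLoop (p : Int → Bool) : List Int → Bool
  | [] => true
  | m :: ms => if p m then pvAllLoop p ms else false

def cnt_palindrome (chars : List (List String)) (M : Int) : Int :=
  let rowCnt := (PySem.List.pyRange 0 8 1).foldl (fun cnt i =>
    (PySem.List.pyRange 0 (8 - M + 1) 1).foldl (fun cnt j =>
      if pvAllLoop (fun m => pvCell (pvRow chars i) (j + m) == pvCell (pvRow chars i) (j + M - 1 - m))
          (PySem.List.pyRange 0 (PySem.Int.floordiv M 2) 1)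
      then cnt + 1 else cnt) cnt) 0
  (PySem.List.pyRange 0 8 1).foldl (fun cnt i =>
    (PySem.List.pyRange 0 (8 - M + 1) 1).foldl (fun cnt j =>
      if pvAllLoop (fun m => pvCell (pvRow chars (j + m)) i == pvCell (pvRow chars (j + M - 1 - m)) i)
          (PySem.List.pyRange 0 (PySem.Int.floordiv M 2) 1)
      then cnt + 1 else cnt) cnt) rowCnt

-- ===== PORT B =====
-- `while c - r >= 0 and c + 1 + r < 8 and s[c-r] == s[c+1+r]: r += 1` (even centers)
def pvExpandE (g : Int → String) (c : Int) (r : Int) : Int :=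
  if h : 0 ≤ c - r ∧ c + 1 + r < 8 ∧ g (c - r) = g (c + 1 + r) then pvExpandE g c (r + 1)
  else r
termination_by (8 - r).toNat
decreasing_by obtain ⟨h1, h2, -⟩ := h; omega

-- `while c - r - 1 >= 0 and c + r + 1 < 8 and s[c-r-1] == s[c+r+1]: r += 1` (odd centers)
def pvExpandO (g : Int → String) (c : Int) (r : Int) : Int :=
  if h : 0 ≤ c - r - 1 ∧ c + r + 1 < 8 ∧ g (c - r - 1) = g (c + r + 1) then pvExpandO g c (r + 1)
  else r
termination_by (8 - r).toNat
decreasing_by obtain ⟨h1, h2, -⟩ := h; omega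

-- _count_line: count centers whose expansion radius reaches need (= M // 2)
def pvCountLine (s : List String) (M need : Int) : Int :=
  if PySem.Int.mod M 2 = 0 then
    (PySem.List.pyRange 0 7 1).foldl (fun cnt c =>
      if need ≤ pvExpandE (fun k => pvCell s k) c 0 then cnt + 1 else cnt) 0
  else
    (PySem.List.pyRange 0 8 1).foldl (fun cnt c =>
      if need ≤ pvExpandO (fun k => pvCell s k) c 0 then cnt + 1 else cnt) 0

def cnt_palindrome_alt (chars : List (List String)) (M : Int) : Int :=
  let w := 8 - M + 1
  if M < 2 then 16 * max 0 w
  else if w ≤ 0 then 0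
  else
    let need := PySem.Int.floordiv M 2
    let lines := (PySem.List.pyRange 0 8 1).map (fun i => pvRow chars i)
      ++ (PySem.List.pyRange 0 8 1).map (fun i =>
           (PySem.List.pyRange 0 8 1).map (fun k => pvCell (pvRow chars k) i))
    lines.foldl (fun total line => total + pvCountLine line M need) 0

-- ===== PRECONDITION & SPEC =====
-- Exactly the inputs on which A returns: for 2 ≤ M ≤ 8 it reads an 8×8 block
-- and raises IndexError on anything smaller; for other M it reads nothing.
def Pre_cnt_palindrome (chars : List (List String)) (M : Int) : Prop :=
  (2 ≤ M ∧ M ≤ 8) → (8 ≤ chars.length ∧ ∀ r ∈ chars.take 8, 8 ≤ r.length)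
instance (chars : List (List String)) (M : Int) : Decidable (Pre_cnt_palindrome chars M) := by
  unfold Pre_cnt_palindrome; infer_instance

def pvWitness_cnt_palindrome : List (List String) × Int :=
  ([["a","b","a","a","b","b","a","b"], ["b","a","a","b","a","b","a","a"],
    ["a","a","b","b","a","a","b","b"], ["b","b","a","a","b","b","a","a"],
    ["a","b","b","a","a","b","b","a"], ["b","a","a","b","b","a","a","b"],
    ["a","a","a","a","b","b","b","b"], ["b","a","b","a","b","a","b","a"]], 3)

def Spec_cnt_palindrome (chars : List (List String)) (M : Int) (out : Int) : Prop := out = cnt_palindrome_alt chars M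
instance (chars : List (List String)) (M : Int) (out : Int) : Decidable (Spec_cnt_palindrome chars M out) := by unfold Spec_cnt_palindrome; infer_instance

-- ===== CLAIM (what is proved, stated in full; the proofs are below) =====
def Claim_equal_cnt_palindrome : Prop := ∀ (chars : List (List String)) (M : Int), Dom_cnt_palindrome chars M → Pre_cnt_palindrome chars M → Spec_cnt_palindrome chars M (cnt_palindrome chars M)

-- ===== LEMMAS AND PROOFS =====

-- the while-conditions of the two expansions, as predicates on the radius
abbrev condE (g : Int → String) (c k : Int) : Prop :=
  0 ≤ c - k ∧ c + 1 + k < 8 ∧ g (c - k) = g (c + 1 + k)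
abbrev condO (g : Int → String) (c k : Int) : Prop :=
  0 ≤ c - k - 1 ∧ c + k + 1 < 8 ∧ g (c - k - 1) = g (c + k + 1)

-- invariant of the even-center while loop, by induction on the fuel 8 - r
lemma expandE_spec_aux (g : Int → String) (c : Int) : ∀ (N : Nat) (r : Int), (8 - r).toNat ≤ N →
    r ≤ pvExpandE g c r ∧ (∀ k, r ≤ k → k < pvExpandE g c r → condE g c k) ∧
      ¬ condE g c (pvExpandE g c r) := by
  intro N
  induction N with
  | zero =>
    intro r hr
    rw [pvExpandE]
    split_ifs with h
    · exfalso; obtain ⟨h1, h2, -⟩ := h; omega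
    · exact ⟨le_refl r, fun k hk1 hk2 => absurd hk2 (by omega), h⟩
  | succ N ih =>
    intro r hr
    rw [pvExpandE]
    split_ifs with h
    · obtain ⟨ih1, ih2, ih3⟩ := ih (r + 1) (by obtain ⟨h1, h2, -⟩ := h; omega)
      refine ⟨by omega, ?_, ih3⟩
      intro k hk1 hk2
      rcases eq_or_lt_of_le hk1 with rfl | hlt
      · exact h
      · exact ih2 k (by omega) hk2
    · exact ⟨le_refl r, fun k hk1 hk2 => absurd hk2 (by omega), h⟩

lemma expandE_spec (g : Int → String) (c r : Int) :
    r ≤ pvExpandE g c r ∧ (∀ k, r ≤ k → k < pvExpandE g c r → condE g c k) ∧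
      ¬ condE g c (pvExpandE g c r) := expandE_spec_aux g c (8 - r).toNat r le_rfl

-- invariant of the odd-center while loop
lemma expandO_spec_aux (g : Int → String) (c : Int) : ∀ (N : Nat) (r : Int), (8 - r).toNat ≤ N →
    r ≤ pvExpandO g c r ∧ (∀ k, r ≤ k → k < pvExpandO g c r → condO g c k) ∧
      ¬ condO g c (pvExpandO g c r) := by
  intro N
  induction N with
  | zero =>
    intro r hr
    rw [pvExpandO]
    split_ifs with h
    · exfalso; obtain ⟨h1, h2, -⟩ := h; omega
    · exact ⟨le_refl r, fun k hk1 hk2 => absurd hk2 (by omega), h⟩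
  | succ N ih =>
    intro r hr
    rw [pvExpandO]
    split_ifs with h
    · obtain ⟨ih1, ih2, ih3⟩ := ih (r + 1) (by obtain ⟨h1, h2, -⟩ := h; omega)
      refine ⟨by omega, ?_, ih3⟩
      intro k hk1 hk2
      rcases eq_or_lt_of_le hk1 with rfl | hlt
      · exact h
      · exact ih2 k (by omega) hk2
    · exact ⟨le_refl r, fun k hk1 hk2 => absurd hk2 (by omega), h⟩

lemma expandO_spec (g : Int → String) (c r : Int) :
    r ≤ pvExpandO g c r ∧ (∀ k, r ≤ k → k < pvExpandO g c r → condO g c k) ∧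
      ¬ condO g c (pvExpandO g c r) := expandO_spec_aux g c (8 - r).toNat r le_rfl

lemma expandE_ge (g : Int → String) (c t : Int) :
    t ≤ pvExpandE g c 0 ↔ ∀ k, 0 ≤ k → k < t → condE g c k := by
  obtain ⟨h1, h2, h3⟩ := expandE_spec g c 0
  constructor
  · intro ht k hk0 hkt; exact h2 k hk0 (by omega)
  · intro h; by_contra hlt
    exact h3 (h _ (by omega) (by omega))

lemma expandO_ge (g : Int → String) (c t : Int) :
    t ≤ pvExpandO g c 0 ↔ ∀ k, 0 ≤ k → k < t → condO g c k := by
  obtain ⟨h1, h2, h3⟩ := expandO_spec g c 0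
  constructor
  · intro ht k hk0 hkt; exact h2 k hk0 (by omega)
  · intro h; by_contra hlt
    exact h3 (h _ (by omega) (by omega))

lemma BfalseE (g : Int → String) (n c : Int) (hn : 1 ≤ n) (hc : c < n - 1 ∨ 8 - n ≤ c) :
    ¬ (n ≤ pvExpandE g c 0) := by
  intro h
  have := (expandE_ge g c n).1 h (n - 1) (by omega) (by omega)
  obtain ⟨b1, b2, -⟩ := this
  omega

lemma BfalseO (g : Int → String) (n c : Int) (hn : 1 ≤ n) (hc : c < n ∨ 8 - n ≤ c) :
    ¬ (n ≤ pvExpandO g c 0) := by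
  intro h
  have := (expandO_ge g c n).1 h (n - 1) (by omega) (by omega)
  obtain ⟨b1, b2, -⟩ := this
  omega

-- reversing the quantifier over [0, n)
lemma forall_rev (n : Int) (P : Int → Prop) :
    (∀ k, 0 ≤ k → k < n → P k) ↔ (∀ m, 0 ≤ m → m < n → P (n - 1 - m)) := by
  constructor
  · intro h m h0 hm; exact h _ (by omega) (by omega)
  · intro h k h0 hk
    have := h (n - 1 - k) (by omega) (by omega)
    rwa [show n - 1 - (n - 1 - k) = k by ring] at this

lemma pvAllLoop_eq_all (p : Int → Bool) (l : List Int) : pvAllLoop p l = l.all p := by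
  induction l with
  | nil => rfl
  | cons m ms ih =>
    simp only [pvAllLoop, List.all_cons, ih]
    cases p m <;> simp

lemma allLoop_iff (g : Int → String) (j M n : Int) :
    pvAllLoop (fun m => g (j + m) == g (j + M - 1 - m)) (PySem.List.pyRange 0 n 1) = true ↔
    ∀ m, 0 ≤ m → m < n → g (j + m) = g (j + M - 1 - m) := by
  rw [pvAllLoop_eq_all]
  simp only [List.all_eq_true, PySem.List.mem_pyRange_one, beq_iff_eq, and_imp]

lemma ABeqE (g : Int → String) (n j : Int) (_hn : 1 ≤ n) (hj0 : 0 ≤ j) (hj : j + 2 * n ≤ 8) :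
    (n ≤ pvExpandE g (j + n - 1) 0) ↔
    (pvAllLoop (fun m => g (j + m) == g (j + 2 * n - 1 - m)) (PySem.List.pyRange 0 n 1) = true) := by
  rw [expandE_ge, allLoop_iff, forall_rev n (fun m => g (j + m) = g (j + 2 * n - 1 - m))]
  constructor
  · intro h k h0 hk
    obtain ⟨-, -, he⟩ := h k h0 hk
    rwa [show j + n - 1 - k = j + (n - 1 - k) by ring,
         show j + n - 1 + 1 + k = j + 2 * n - 1 - (n - 1 - k) by ring] at he
  · intro h k h0 hk
    refine ⟨by omega, by omega, ?_⟩
    have := h k h0 hk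
    rwa [show j + (n - 1 - k) = j + n - 1 - k by ring,
         show j + 2 * n - 1 - (n - 1 - k) = j + n - 1 + 1 + k by ring] at this

lemma ABeqO (g : Int → String) (n j : Int) (_hn : 1 ≤ n) (hj0 : 0 ≤ j) (hj : j + 2 * n + 1 ≤ 8) :
    (n ≤ pvExpandO g (j + n) 0) ↔
    (pvAllLoop (fun m => g (j + m) == g (j + (2 * n + 1) - 1 - m)) (PySem.List.pyRange 0 n 1) = true) := by
  rw [expandO_ge, allLoop_iff, forall_rev n (fun m => g (j + m) = g (j + (2 * n + 1) - 1 - m))]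
  constructor
  · intro h k h0 hk
    obtain ⟨-, -, he⟩ := h k h0 hk
    rwa [show j + n - k - 1 = j + (n - 1 - k) by ring,
         show j + n + k + 1 = j + (2 * n + 1) - 1 - (n - 1 - k) by ring] at he
  · intro h k h0 hk
    refine ⟨by omega, by omega, ?_⟩
    have := h k h0 hk
    rwa [show j + (n - 1 - k) = j + n - k - 1 by ring,
         show j + (2 * n + 1) - 1 - (n - 1 - k) = j + n + k + 1 by ring] at this

lemma pyRange_shift (a n : Int) :
    PySem.List.pyRange a (a + n) 1 = (PySem.List.pyRange 0 n 1).map (fun x => x + a) := by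
  rw [PySem.List.pyRange_one, PySem.List.pyRange_one, List.map_map]
  simp only [add_sub_cancel_left, Int.sub_zero]
  exact List.map_congr_left (fun k _ => by simp [Function.comp]; ring)

-- the per-line heart: A's window count equals B's center count, for 2 ≤ M ≤ 8
lemma line_eq (s : List String) (M : Int) (h2 : 2 ≤ M) (h8 : M ≤ 8) :
    ((PySem.List.pyRange 0 (8 - M + 1) 1).countP (fun j =>
        pvAllLoop (fun m => pvCell s (j + m) == pvCell s (j + M - 1 - m))
          (PySem.List.pyRange 0 (PySem.Int.floordiv M 2) 1)) : Int)
    = pvCountLine s M (PySem.Int.floordiv M 2) := by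
  have hm2 : PySem.Int.mod M 2 = M % 2 := PySem.Int.mod_eq_emod_of_pos (by norm_num)
  have hfd : PySem.Int.floordiv M 2 = M / 2 := PySem.Int.floordiv_eq_ediv_of_pos (by norm_num)
  unfold pvCountLine
  rw [hm2, hfd]
  by_cases hpar : M % 2 = 0
  · rw [if_pos hpar]
    obtain ⟨n, rfl⟩ : ∃ n, M = 2 * n := ⟨M / 2, by omega⟩
    have hn1 : 1 ≤ n := by omega
    have hn4 : n ≤ 4 := by omega
    rw [show (2 * n) / 2 = n by omega]
    rw [PySem.List.foldl_ite_add_one]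
    rw [PySem.List.pyRange_one_append 0 (n - 1) 7 (by omega) (by omega),
        PySem.List.pyRange_one_append (n - 1) (8 - n) 7 (by omega) (by omega),
        List.countP_append, List.countP_append]
    have hz1 : (PySem.List.pyRange 0 (n - 1) 1).countP
        (fun c => decide (n ≤ pvExpandE (fun k => pvCell s k) c 0)) = 0 := by
      refine List.countP_eq_zero.mpr fun c hc => ?_
      rw [PySem.List.mem_pyRange_one] at hc
      simp only [decide_eq_true_eq]
      exact BfalseE _ n c hn1 (Or.inl (by omega))
    have hz3 : (PySem.List.pyRange (8 - n) 7 1).countP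
        (fun c => decide (n ≤ pvExpandE (fun k => pvCell s k) c 0)) = 0 := by
      refine List.countP_eq_zero.mpr fun c hc => ?_
      rw [PySem.List.mem_pyRange_one] at hc
      simp only [decide_eq_true_eq]
      exact BfalseE _ n c hn1 (Or.inr (by omega))
    have hmid : (PySem.List.pyRange (n - 1) (8 - n) 1).countP
        (fun c => decide (n ≤ pvExpandE (fun k => pvCell s k) c 0))
        = (PySem.List.pyRange 0 (8 - 2 * n + 1) 1).countP (fun j =>
            pvAllLoop (fun m => pvCell s (j + m) == pvCell s (j + 2 * n - 1 - m))
              (PySem.List.pyRange 0 n 1)) := by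
      rw [show (8 : Int) - n = (n - 1) + (8 - 2 * n + 1) by ring, pyRange_shift, List.countP_map]
      refine List.countP_congr fun j hj => ?_
      rw [PySem.List.mem_pyRange_one] at hj
      simp only [Function.comp_apply, decide_eq_true_eq]
      rw [show j + (n - 1) = j + n - 1 by ring]
      exact ABeqE _ n j hn1 (by omega) (by omega)
    rw [hz1, hz3, hmid]
    simp
  · rw [if_neg hpar]
    obtain ⟨n, rfl⟩ : ∃ n, M = 2 * n + 1 := ⟨M / 2, by omega⟩
    have hn1 : 1 ≤ n := by omega
    have hn3 : n ≤ 3 := by omega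
    rw [show (2 * n + 1) / 2 = n by omega]
    rw [PySem.List.foldl_ite_add_one]
    rw [PySem.List.pyRange_one_append 0 n 8 (by omega) (by omega),
        PySem.List.pyRange_one_append n (8 - n) 8 (by omega) (by omega),
        List.countP_append, List.countP_append]
    have hz1 : (PySem.List.pyRange 0 n 1).countP
        (fun c => decide (n ≤ pvExpandO (fun k => pvCell s k) c 0)) = 0 := by
      refine List.countP_eq_zero.mpr fun c hc => ?_
      rw [PySem.List.mem_pyRange_one] at hc
      simp only [decide_eq_true_eq]
      exact BfalseO _ n c hn1 (Or.inl (by omega))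
    have hz3 : (PySem.List.pyRange (8 - n) 8 1).countP
        (fun c => decide (n ≤ pvExpandO (fun k => pvCell s k) c 0)) = 0 := by
      refine List.countP_eq_zero.mpr fun c hc => ?_
      rw [PySem.List.mem_pyRange_one] at hc
      simp only [decide_eq_true_eq]
      exact BfalseO _ n c hn1 (Or.inr (by omega))
    have hmid : (PySem.List.pyRange n (8 - n) 1).countP
        (fun c => decide (n ≤ pvExpandO (fun k => pvCell s k) c 0))
        = (PySem.List.pyRange 0 (8 - (2 * n + 1) + 1) 1).countP (fun j =>
            pvAllLoop (fun m => pvCell s (j + m) == pvCell s (j + (2 * n + 1) - 1 - m))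
              (PySem.List.pyRange 0 n 1)) := by
      rw [show (8 : Int) - n = n + (8 - (2 * n + 1) + 1) by ring, pyRange_shift, List.countP_map]
      refine List.countP_congr fun j hj => ?_
      rw [PySem.List.mem_pyRange_one] at hj
      simp only [Function.comp_apply, decide_eq_true_eq]
      rw [show j + n = j + n by ring]
      exact ABeqO _ n j hn1 (by omega) (by omega)
    rw [hz1, hz3, hmid]
    simp

-- loop over a list appending a constant: used for the M < 2 closed form
lemma foldl_const (l : List Int) (a K : Int) :
    l.foldl (fun cnt _ => cnt + K) a = a + (l.length : Int) * K := by
  rw [show (fun (cnt : Int) (_ : Int) => cnt + K) = fun acc x => acc + (fun _ => K) x from rfl,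
    PySem.List.foldl_add, PySem.List.sum_map_const_int]

lemma pvAllLoop_congr (p q : Int → Bool) (l : List Int) (h : ∀ m ∈ l, p m = q m) :
    pvAllLoop p l = pvAllLoop q l := by
  induction l with
  | nil => rfl
  | cons m ms ih =>
    simp only [pvAllLoop, h m (by simp)]
    exact if_congr Iff.rfl (ih fun x hx => h x (by simp [hx])) rfl

-- ===== VERDICT (by name: the statement is the Claim_ definition above) =====
theorem cnt_palindrome_spec : Claim_equal_cnt_palindrome := by
  intro chars M _ _
  unfold Spec_cnt_palindrome cnt_palindrome
  simp only [cnt_palindrome_alt]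
  by_cases hM : M < 2
  · -- M < 2: A's inner check is vacuous, every window counts; B is the closed form
    rw [if_pos hM]
    have hr : PySem.List.pyRange 0 (PySem.Int.floordiv M 2) 1 = [] := by
      rw [PySem.Int.floordiv_eq_ediv_of_pos (by norm_num)]
      exact PySem.List.pyRange_one_eq_nil (by omega)
    simp only [hr, pvAllLoop, if_true, foldl_const, PySem.List.length_pyRange_one]
    norm_num
    omega
  · rw [if_neg hM]
    by_cases hw : 8 - M + 1 ≤ 0
    · -- M > 8: no window fits; both sides are 0
      rw [if_pos hw, PySem.List.pyRange_one_eq_nil (show 8 - M + 1 ≤ 0 from hw)]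
      simp
    · rw [if_neg hw]
      have h2 : 2 ≤ M := by omega
      have h8 : M ≤ 8 := by omega
      -- A: each nested fold is a window count per line
      have hA : ∀ (q : Int → Int → Bool) (a : Int),
          (PySem.List.pyRange 0 8 1).foldl (fun cnt i =>
            (PySem.List.pyRange 0 (8 - M + 1) 1).foldl (fun cnt j =>
              if q i j then cnt + 1 else cnt) cnt) a
          = a + ((PySem.List.pyRange 0 8 1).map (fun i =>
              (((PySem.List.pyRange 0 (8 - M + 1) 1).countP (q i)) : Int))).sum := by
        intro q a
        rw [PySem.List.foldl_congr_mem _ _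
          (fun cnt i => cnt + (((PySem.List.pyRange 0 (8 - M + 1) 1).countP (q i)) : Int)) a
          (fun cnt i _ => by
            rw [PySem.List.foldl_ite_add_one]
            simp only [Bool.decide_eq_true]),
          PySem.List.foldl_add]
      simp only [hA]
      -- B: the fold over the 16 lines is a sum of per-line counts
      rw [List.foldl_append, PySem.List.foldl_add, PySem.List.foldl_add,
        List.map_map, List.map_map]
      -- rows agree by line_eq directly
      have hrow : (PySem.List.pyRange 0 8 1).map (fun i =>
            (((PySem.List.pyRange 0 (8 - M + 1) 1).countP (fun j =>
              pvAllLoop (fun m => pvCell (pvRow chars i) (j + m) == pvCell (pvRow chars i) (j + M - 1 - m))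
                (PySem.List.pyRange 0 (PySem.Int.floordiv M 2) 1))) : Int))
          = (PySem.List.pyRange 0 8 1).map
            ((fun line => pvCountLine line M (PySem.Int.floordiv M 2)) ∘ fun i => pvRow chars i) := by
        refine List.map_congr_left fun i _ => ?_
        exact line_eq (pvRow chars i) M h2 h8
      -- columns agree by line_eq after exchanging the accessor for the built column list
      have hcol : (PySem.List.pyRange 0 8 1).map (fun i =>
            (((PySem.List.pyRange 0 (8 - M + 1) 1).countP (fun j =>
              pvAllLoop (fun m => pvCell (pvRow chars (j + m)) i == pvCell (pvRow chars (j + M - 1 - m)) i)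
                (PySem.List.pyRange 0 (PySem.Int.floordiv M 2) 1))) : Int))
          = (PySem.List.pyRange 0 8 1).map
            ((fun line => pvCountLine line M (PySem.Int.floordiv M 2)) ∘ fun i =>
              (PySem.List.pyRange 0 8 1).map fun k => pvCell (pvRow chars k) i) := by
        refine List.map_congr_left fun i _ => ?_
        simp only [Function.comp_apply]
        rw [← line_eq ((PySem.List.pyRange 0 8 1).map fun k => pvCell (pvRow chars k) i) M h2 h8]
        congr 1
        refine List.countP_congr fun j hj => ?_
        rw [PySem.List.mem_pyRange_one] at hj
        have hsw : pvAllLoop (fun m =>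
              pvCell ((PySem.List.pyRange 0 8 1).map fun k => pvCell (pvRow chars k) i) (j + m) ==
              pvCell ((PySem.List.pyRange 0 8 1).map fun k => pvCell (pvRow chars k) i) (j + M - 1 - m))
            (PySem.List.pyRange 0 (PySem.Int.floordiv M 2))
            = pvAllLoop (fun m =>
              pvCell (pvRow chars (j + m)) i == pvCell (pvRow chars (j + M - 1 - m)) i)
            (PySem.List.pyRange 0 (PySem.Int.floordiv M 2)) := by
          refine pvAllLoop_congr _ _ _ fun m hm => ?_
          rw [PySem.List.mem_pyRange_one, PySem.Int.floordiv_eq_ediv_of_pos (by norm_num)] at hm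
          have e1 : pvCell ((PySem.List.pyRange 0 8 1).map fun k => pvCell (pvRow chars k) i) (j + m)
              = pvCell (pvRow chars (j + m)) i := by
            show PySem.List.pyGetD _ _ _ = _
            rw [PySem.List.pyGetD_map_pyRange_of_nonneg _ _ _ _ (by omega) (by omega)]
          have e2 : pvCell ((PySem.List.pyRange 0 8 1).map fun k => pvCell (pvRow chars k) i) (j + M - 1 - m)
              = pvCell (pvRow chars (j + M - 1 - m)) i := by
            show PySem.List.pyGetD _ _ _ = _
            rw [PySem.List.pyGetD_map_pyRange_of_nonneg _ _ _ _ (by omega) (by omega)]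
          rw [e1, e2]
        rw [hsw]
      rw [hrow, hcol]
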